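-- pv_equiv track=rewrite | github.com/Jacob234/Politico_Playbook | politico_playbook/tests/compare_nlp_approaches.py | count_captured_figures
-- ===== SOURCE A (Python) =====
-- def count_captured_figures(entities, expected_figures):
--     """Count how many expected figures were captured."""
--     captured = 0
--     entity_names = [entity.get('name', '').lower() for entity in entities]
--
--     for expected in expected_figures:
--         expected_lower = expected.lower()
--         # Check if any entity name contains the expected figure
--         if any(expected_lower in name for name in entity_names):
--             captured += 1
--
--     return captured
-- ===== SOURCE B (Python) =====
-- def count_captured_figures(entities, expected_figures):
--     """Count how many expected figures were captured (single pass over entities,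
--     accumulating the set of patterns already seen)."""
--     patterns = [e.lower() for e in expected_figures]
--     found = set()
--     for entity in entities:
--         name = entity.get('name', '').lower()
--         for p in patterns:
--             if p not in found and p in name:
--                 found.add(p)
--     return sum(1 for p in patterns if p in found)
-- ===== Notes on version B (the rewrite author's own statement) =====
-- stated objective: alternative
-- what changed: Inverted loop nesting: instead of scanning all entity names once per expected figure, B makes one pass over the entities, accumulating the set of (lowercased) patterns found so far, and finally counts which patterns ended up in the set.
import Mathlib
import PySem

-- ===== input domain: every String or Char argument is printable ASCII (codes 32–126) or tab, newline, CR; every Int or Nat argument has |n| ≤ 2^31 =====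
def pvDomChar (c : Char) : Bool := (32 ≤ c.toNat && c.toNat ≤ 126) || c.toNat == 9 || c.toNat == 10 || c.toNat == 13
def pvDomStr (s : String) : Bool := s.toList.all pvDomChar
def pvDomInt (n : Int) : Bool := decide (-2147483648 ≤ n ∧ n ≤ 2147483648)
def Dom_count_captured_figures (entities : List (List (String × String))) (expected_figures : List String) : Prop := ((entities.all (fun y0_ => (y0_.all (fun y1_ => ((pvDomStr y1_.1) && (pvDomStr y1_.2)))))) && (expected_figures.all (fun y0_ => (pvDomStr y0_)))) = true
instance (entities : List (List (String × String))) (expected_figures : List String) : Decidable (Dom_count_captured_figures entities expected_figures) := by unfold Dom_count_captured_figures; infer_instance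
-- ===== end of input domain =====

-- B inverts the loop nesting: one pass over the entities accumulating the set of
-- patterns found so far, then a final count over the patterns (alternative structure,
-- same worst-case cost).

-- ===== PORT A =====
def count_captured_figures (entities : List (List (String × String))) (expected_figures : List String) : Int :=
  let entity_names := entities.map (fun entity => PySem.Str.lower (PySem.Dict.getD (PySem.Dict.mk entity) "name" ""))
  expected_figures.foldl (fun captured expected =>
    let expected_lower := PySem.Str.lower expected
    if entity_names.any (fun name => PySem.Str.isIn expected_lower name) then
      captured + 1
    else captured) 0

-- ===== PORT B =====
def count_captured_figures_alt (entities : List (List (String × String))) (expected_figures : List String) : Int :=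
  let patterns := expected_figures.map (fun e => PySem.Str.lower e)
  let found : PySem.Set String := entities.foldl (fun found entity =>
      let name := PySem.Str.lower (PySem.Dict.getD (PySem.Dict.mk entity) "name" "")
      patterns.foldl (fun f p =>
        if !PySem.Set.contains f p && PySem.Str.isIn p name then PySem.Set.add f p else f) found)
    PySem.Set.empty
  patterns.foldl (fun c p => if PySem.Set.contains found p then c + 1 else c) 0

-- ===== PRECONDITION & SPEC =====
def Spec_count_captured_figures (entities : List (List (String × String))) (expected_figures : List String) (out : Int) : Prop := out = count_captured_figures_alt entities expected_figures
instance (entities : List (List (String × String))) (expected_figures : List String) (out : Int) : Decidable (Spec_count_captured_figures entities expected_figures out) := by unfold Spec_count_captured_figures; infer_instance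

-- ===== CLAIM (what is proved, stated in full; the proofs are below) =====
def Claim_equal_count_captured_figures : Prop := ∀ (entities : List (List (String × String))) (expected_figures : List String), Dom_count_captured_figures entities expected_figures → Spec_count_captured_figures entities expected_figures (count_captured_figures entities expected_figures)

-- ===== LEMMAS AND PROOFS =====

-- membership in the inner fold (one entity name against all patterns)
theorem mem_inner_fold (ps : List String) (name : String) (f : PySem.Set String) (q : String) :
    (q ∈ ps.foldl (fun f p =>
        if !PySem.Set.contains f p && PySem.Str.isIn p name then PySem.Set.add f p else f) f)
    ↔ q ∈ f ∨ (q ∈ ps ∧ PySem.Str.isIn q name = true) := by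
  induction ps generalizing f with
  | nil => simp
  | cons p ps ih =>
    simp only [List.foldl_cons, ih]
    by_cases hc : (!PySem.Set.contains f p && PySem.Str.isIn p name) = true
    · simp only [if_pos hc, PySem.Set.mem_add]
      simp only [Bool.and_eq_true, Bool.not_eq_true'] at hc
      constructor
      · rintro (((h | rfl) | h)) <;> simp_all
      · rintro (h | ⟨hq, hin⟩)
        · exact Or.inl (Or.inl h)
        · rcases List.mem_cons.mp hq with rfl | hq
          · exact Or.inl (Or.inr rfl)
          · exact Or.inr ⟨hq, hin⟩
    · simp only [if_neg hc]
      simp only [Bool.and_eq_true, Bool.not_eq_true'] at hc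
      constructor
      · rintro (h | ⟨hq, hin⟩)
        · exact Or.inl h
        · exact Or.inr ⟨List.mem_cons_of_mem _ hq, hin⟩
      · rintro (h | ⟨hq, hin⟩)
        · exact Or.inl h
        · rcases List.mem_cons.mp hq with rfl | hq
          · -- q = p; then ¬contains f p ∧ isIn failed, so contains f p = true
            rcases not_and_or.mp hc with h1 | h2
            · left; exact (PySem.Set.contains_iff _ _).mp (Bool.not_eq_false _ ▸ (by
                revert h1; cases hcc : PySem.Set.contains f q <;> simp_all))
            · exact absurd hin h2
          · exact Or.inr ⟨hq, hin⟩

-- membership in the outer fold (pass over entities)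
theorem mem_outer_fold (ps : List String) (es : List (List (String × String))) (f : PySem.Set String) (q : String) :
    (q ∈ es.foldl (fun found entity =>
        let name := PySem.Str.lower (PySem.Dict.getD (PySem.Dict.mk entity) "name" "")
        ps.foldl (fun f p =>
          if !PySem.Set.contains f p && PySem.Str.isIn p name then PySem.Set.add f p else f) found) f)
    ↔ q ∈ f ∨ (q ∈ ps ∧ ∃ e ∈ es, PySem.Str.isIn q (PySem.Str.lower (PySem.Dict.getD (PySem.Dict.mk e) "name" "")) = true) := by
  induction es generalizing f with
  | nil => simp
  | cons e es ih =>
    simp only [List.foldl_cons, ih, mem_inner_fold]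
    constructor
    · rintro ((h | ⟨hq, hin⟩) | ⟨hq, e', he', hin⟩)
      · exact Or.inl h
      · exact Or.inr ⟨hq, e, List.mem_cons_self, hin⟩
      · exact Or.inr ⟨hq, e', List.mem_cons_of_mem _ he', hin⟩
    · rintro (h | ⟨hq, e', he', hin⟩)
      · exact Or.inl (Or.inl h)
      · rcases List.mem_cons.mp he' with rfl | he'
        · exact Or.inl (Or.inr ⟨hq, hin⟩)
        · exact Or.inr ⟨hq, e', he', hin⟩

-- the two counting folds agree when the per-element conditions agree
theorem count_fold_congr (l : List String) (condA : String → Bool) (condB : String → Bool)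
    (h : ∀ e ∈ l, condA e = condB (PySem.Str.lower e)) (c : Int) :
    l.foldl (fun captured expected => if condA expected then captured + 1 else captured) c
    = (l.map (fun e => PySem.Str.lower e)).foldl (fun c p => if condB p then c + 1 else c) c := by
  induction l generalizing c with
  | nil => rfl
  | cons e l ih =>
    simp only [List.map_cons, List.foldl_cons, h e List.mem_cons_self]
    exact ih (fun x hx => h x (List.mem_cons_of_mem _ hx)) _

-- ===== VERDICT (by name: the statement is the Claim_ definition above) =====
theorem count_captured_figures_spec : Claim_equal_count_captured_figures := by
  intro entities expected_figures _
  show _ = _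
  unfold count_captured_figures count_captured_figures_alt
  simp only []
  rw [count_fold_congr (condB := fun p =>
    PySem.Set.contains (entities.foldl (fun found entity =>
      let name := PySem.Str.lower (PySem.Dict.getD (PySem.Dict.mk entity) "name" "")
      (expected_figures.map (fun e => PySem.Str.lower e)).foldl (fun f p =>
        if !PySem.Set.contains f p && PySem.Str.isIn p name then PySem.Set.add f p else f) found)
      PySem.Set.empty) p)]
  intro e he
  have hmem : PySem.Str.lower e ∈ expected_figures.map (fun e => PySem.Str.lower e) :=
    List.mem_map_of_mem he
  rw [Bool.eq_iff_iff]
  rw [PySem.Set.contains_iff, mem_outer_fold]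
  simp only [PySem.Set.empty, List.not_mem_nil, false_or, List.any_eq_true, List.mem_map]
  constructor
  · rintro ⟨name, ⟨ent, hent, rfl⟩, hin⟩
    exact ⟨⟨e, he, rfl⟩, ent, hent, hin⟩
  · rintro ⟨-, ent, hent, hin⟩
    exact ⟨_, ⟨ent, hent, rfl⟩, hin⟩
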